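-- pv_equiv track=rewrite | github.com/utilizzato/workshop | sim/random_subset_ap.py | count_aps_in_subset_alt
-- ===== SOURCE A (Python) =====
-- k = 3
--
-- def count_aps_in_subset_alt(A):
--     assert k==3
--     c = 0
--     for a1 in A:
--         for a2 in A:
--             if a2 > a1:
--                 a3 = 2*a2 - a1
--                 if a3 in A:
--                     c += 1
--     return c
-- ===== SOURCE B (Python) =====
-- def count_aps_in_subset_alt(A):
--     cnt = {}
--     for x in A:
--         cnt[x] = cnt.get(x, 0) + 1
--     items = list(cnt.items())
--     c = 0
--     for x, cx in items:
--         for y, cy in items: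
--             if y > x and (2 * y - x) in cnt:
--                 c += cx * cy
--     return c
-- ===== Notes on version B (the rewrite author's own statement) =====
-- stated objective: alternative
-- what changed: B builds a multiplicity dict in one pass and counts each distinct (a1,a2) pair once weighted by cnt[a1]*cnt[a2], testing 2*a2-a1 by dict membership, instead of A's nested loops over the raw list with a linear 'in A' scan inside; it trades A's O(n^3) raw-list scan for O(n + d^2) over the d distinct values, which only wins on duplicate-heavy input.
import Mathlib
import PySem

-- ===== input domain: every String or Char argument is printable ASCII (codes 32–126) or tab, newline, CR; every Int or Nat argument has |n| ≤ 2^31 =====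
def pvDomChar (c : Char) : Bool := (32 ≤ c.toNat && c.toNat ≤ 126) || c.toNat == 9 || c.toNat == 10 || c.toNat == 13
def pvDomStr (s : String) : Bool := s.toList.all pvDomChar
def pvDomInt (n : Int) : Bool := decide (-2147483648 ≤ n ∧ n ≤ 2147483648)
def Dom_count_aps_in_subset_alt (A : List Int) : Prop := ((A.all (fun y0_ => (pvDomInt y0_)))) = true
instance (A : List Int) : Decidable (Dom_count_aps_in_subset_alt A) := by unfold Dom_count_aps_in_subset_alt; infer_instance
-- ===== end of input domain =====

-- B counts each distinct (a1,a2) pair once, weighted by multiplicities from a dict built in one pass,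
-- with dict membership for 2*a2-a1, instead of A's nested raw-list loops with a linear 'in A' scan (alternative algorithm).


-- ===== PORT A =====
-- assert k == 3 always passes (module constant k = 3), so it is not modelled.
def count_aps_in_subset_alt (A : List Int) : Int :=
  A.foldl (fun c a1 =>
    A.foldl (fun c a2 =>
      if a2 > a1 then
        (if (2 * a2 - a1) ∈ A then c + 1 else c)
      else c) c) 0

-- ===== PORT B =====
def count_aps_in_subset_alt_alt (A : List Int) : Int :=
  let cnt : PySem.Dict Int Int := A.foldl (fun d x => d.insert x (d.getD x 0 + 1)) PySem.Dict.empty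
  let items := cnt.items
  items.foldl (fun c p =>
    items.foldl (fun c q =>
      if q.1 > p.1 ∧ cnt.contains (2 * q.1 - p.1) then c + p.2 * q.2 else c) c) 0

-- ===== PRECONDITION & SPEC =====
def Spec_count_aps_in_subset_alt (A : List Int) (out : Int) : Prop := out = count_aps_in_subset_alt_alt A
instance (A : List Int) (out : Int) : Decidable (Spec_count_aps_in_subset_alt A out) := by unfold Spec_count_aps_in_subset_alt; infer_instance

-- ===== CLAIM (what is proved, stated in full; the proofs are below) =====
def Claim_equal_count_aps_in_subset_alt : Prop := ∀ (A : List Int), Dom_count_aps_in_subset_alt A → Spec_count_aps_in_subset_alt A (count_aps_in_subset_alt A)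

-- ===== LEMMAS AND PROOFS =====

-- a guarded accumulating loop is the sum of its guarded contributions
theorem pvFoldlIteAdd {α : Type} (l : List α) (p : α → Prop) [DecidablePred p]
    (v : α → Int) (a : Int) :
    l.foldl (fun c x => if p x then c + v x else c) a
      = a + (l.map (fun x => if p x then v x else 0)).sum := by
  rw [PySem.List.foldl_congr_mem l _ (fun c x => c + (if p x then v x else 0)) a
    (by intro acc x _; by_cases h : p x <;> simp [h])]
  exact PySem.List.foldl_add l _ a

-- summing a value-only function over the list = summing count·value over the distinct elements
theorem pvKey (A : List Int) (g : Int → Int) :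
    ((PySem.Set.ofList A).map (fun k => (A.count k : Int) * g k)).sum = (A.map g).sum := by
  rw [← List.sum_toFinset (fun k => (A.count k : Int) * g k) (PySem.Set.nodup_ofList A)]
  have hfin : (PySem.Set.ofList A).toFinset = A.toFinset := by
    ext x; simp [PySem.Set.mem_ofList]
  rw [hfin, Finset.sum_list_map_count A g]
  apply Finset.sum_congr rfl
  intro x _
  simp

theorem pvA_sum (A : List Int) :
    count_aps_in_subset_alt A
      = (A.map (fun a1 => (A.map (fun a2 =>
          if a2 > a1 ∧ (2 * a2 - a1) ∈ A then (1:Int) else 0)).sum)).sum := by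
  unfold count_aps_in_subset_alt
  rw [PySem.List.foldl_congr_mem A _
    (fun c a1 => c + (A.map (fun a2 =>
      if a2 > a1 ∧ (2 * a2 - a1) ∈ A then (1:Int) else 0)).sum) 0]
  · rw [PySem.List.foldl_add]; ring
  · intro acc a1 _
    rw [PySem.List.foldl_congr_mem A _
      (fun c a2 => if a2 > a1 ∧ (2 * a2 - a1) ∈ A then c + 1 else c) acc
      (by intro c a2 _; split_ifs <;> simp_all)]
    rw [pvFoldlIteAdd A (fun a2 => a2 > a1 ∧ (2 * a2 - a1) ∈ A) (fun _ => 1) acc]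

theorem pvB_sum (A : List Int) :
    count_aps_in_subset_alt_alt A
      = ((PySem.Set.ofList A).map (fun x => (A.count x : Int) *
          ((PySem.Set.ofList A).map (fun y =>
            if y > x ∧ (2 * y - x) ∈ A then (A.count y : Int) else 0)).sum)).sum := by
  unfold count_aps_in_subset_alt_alt
  simp only [PySem.Dict.foldl_insert_getD_add_one_eq_counter, PySem.Dict.items_counter]
  rw [PySem.List.foldl_congr_mem _ _
    (fun c p => c + (((PySem.Set.ofList A).map (fun k => (k, (A.count k : Int)))).map
      (fun q => if q.1 > p.1 ∧ (PySem.Dict.counter A).contains (2 * q.1 - p.1) then p.2 * q.2 else 0)).sum) 0]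
  · rw [PySem.List.foldl_add, List.map_map]
    simp only [zero_add]
    apply congrArg
    apply List.map_congr_left
    intro x _
    simp only [Function.comp, List.map_map]
    rw [← List.sum_map_mul_left]
    apply congrArg
    apply List.map_congr_left
    intro y _
    simp only [Function.comp, PySem.Dict.contains_counter, List.contains_iff_mem]
    split_ifs <;> simp_all
  · intro acc p _
    exact pvFoldlIteAdd _ (fun (q : Int × Int) => q.1 > p.1 ∧ (PySem.Dict.counter A).contains (2 * q.1 - p.1))
      (fun (q : Int × Int) => p.2 * q.2) acc

-- ===== VERDICT (by name: the statement is the Claim_ definition above) =====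
theorem count_aps_in_subset_alt_spec : Claim_equal_count_aps_in_subset_alt := by
  intro A _
  unfold Spec_count_aps_in_subset_alt
  rw [pvA_sum, pvB_sum]
  rw [← pvKey A (fun a1 => (A.map (fun a2 =>
      if a2 > a1 ∧ (2 * a2 - a1) ∈ A then (1:Int) else 0)).sum)]
  apply congrArg
  apply List.map_congr_left
  intro x _
  apply congrArg
  rw [← pvKey A (fun a2 => if a2 > x ∧ (2 * a2 - x) ∈ A then (1:Int) else 0)]
  apply congrArg
  apply List.map_congr_left
  intro y _
  split_ifs <;> simp
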